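-- pv_equiv track=rewrite | github.com/sanjana-d/csc384-Intro-To-AI | Labs/A3-starter-files-dasadias/cspmodel.py | satisfying_tuples_white_dots
-- ===== SOURCE A (Python) =====
-- def satisfying_tuples_white_dots(dim):
--     """
--     Return a list of satifying tuples for white dot constraints.
--
--     :param dim: Size of the board
--     :type dim: int
--
--     :returns: A list of satifying tuples
--     :rtype: List[(int,int)]
--     """
--
--     tups = []
--     for i in range(1, dim+1):
--         for j in range(1, dim+1):
--             if i != j:
--                 if i-j == 1 or j-i == 1:
--                     tups.append((i, j))
--     return tups
-- ===== SOURCE B (Python) =====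
-- def satisfying_tuples_white_dots(dim):
--     """
--     Return a list of satifying tuples for white dot constraints.
--
--     :param dim: Size of the board
--     :type dim: int
--
--     :returns: A list of satifying tuples
--     :rtype: List[(int,int)]
--     """
--
--     tups = []
--     for i in range(1, dim + 1):
--         if i > 1:
--             tups.append((i, i - 1))
--         if i < dim:
--             tups.append((i, i + 1))
--     return tups
-- ===== Notes on version B (the rewrite author's own statement) =====
-- stated objective: faster
-- what changed: Replaces the quadratic double scan testing |i-j|==1 for every pair by a single pass over i that directly emits (i,i-1) and (i,i+1) when they lie in range.
import Mathlib
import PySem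

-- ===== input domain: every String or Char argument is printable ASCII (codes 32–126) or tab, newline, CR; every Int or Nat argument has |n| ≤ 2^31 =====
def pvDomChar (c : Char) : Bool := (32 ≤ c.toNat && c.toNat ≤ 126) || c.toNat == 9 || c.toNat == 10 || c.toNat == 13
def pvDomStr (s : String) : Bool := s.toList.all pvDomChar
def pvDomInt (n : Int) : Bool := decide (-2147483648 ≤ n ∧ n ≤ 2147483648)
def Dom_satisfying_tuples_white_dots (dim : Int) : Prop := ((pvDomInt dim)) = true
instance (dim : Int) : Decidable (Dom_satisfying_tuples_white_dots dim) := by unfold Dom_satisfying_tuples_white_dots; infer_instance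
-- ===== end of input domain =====

-- ===== PORT A =====
-- B replaces A's quadratic all-pairs scan with a single linear pass (objective: faster, asymptotic).
def satisfying_tuples_white_dots (dim : Int) : List (Int × Int) :=
  (PySem.List.pyRange 1 (dim + 1) 1).foldl (fun tups i =>
    (PySem.List.pyRange 1 (dim + 1) 1).foldl (fun tups j =>
      if i ≠ j then
        if i - j = 1 ∨ j - i = 1 then tups ++ [(i, j)] else tups
      else tups) tups) []

-- ===== PORT B =====
def satisfying_tuples_white_dots_alt (dim : Int) : List (Int × Int) :=
  (PySem.List.pyRange 1 (dim + 1) 1).foldl (fun tups i =>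
    let tups := if 1 < i then tups ++ [(i, i - 1)] else tups
    if i < dim then tups ++ [(i, i + 1)] else tups) []

-- ===== PRECONDITION & SPEC =====
def Spec_satisfying_tuples_white_dots (dim : Int) (out : List (Int × Int)) : Prop := out = satisfying_tuples_white_dots_alt dim
instance (dim : Int) (out : List (Int × Int)) : Decidable (Spec_satisfying_tuples_white_dots dim out) := by unfold Spec_satisfying_tuples_white_dots; infer_instance

-- ===== CLAIM (what is proved, stated in full; the proofs are below) =====
def Claim_equal_satisfying_tuples_white_dots : Prop := ∀ (dim : Int), Dom_satisfying_tuples_white_dots dim → Spec_satisfying_tuples_white_dots dim (satisfying_tuples_white_dots dim)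

-- ===== LEMMAS AND PROOFS =====

-- On a strictly increasing list, filtering for the two values x < y keeps each exactly once, in order.
theorem filter_two_mem (l : List Int) (hl : l.Pairwise (· < ·)) (x y : Int) (hxy : x < y) :
    l.filter (fun j => j == x || j == y) =
      (if x ∈ l then [x] else []) ++ (if y ∈ l then [y] else []) := by
  induction l with
  | nil => simp
  | cons a t ih =>
    have hat : ∀ z ∈ t, a < z := (List.pairwise_cons.mp hl).1
    have ht : t.Pairwise (· < ·) := (List.pairwise_cons.mp hl).2
    by_cases hax : a = x
    · have hxt : x ∉ t := fun h => absurd (hat x h) (by omega)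
      have hyx : y ≠ x := by omega
      have hya : y ≠ a := by omega
      simp [hax, ih ht, hyx, hya, hxt]
    · by_cases hay : a = y
      · have hyt : y ∉ t := fun h => absurd (hat y h) (by omega)
        have hxt : x ∉ t := fun h => absurd (hat x h) (by omega)
        have hxa : x ≠ a := by omega
        simp [hay, ih ht, hxt, hyt, hxy.ne]
      · have hxa : x ≠ a := fun h => hax h.symm
        have hya : y ≠ a := fun h => hay h.symm
        simp [hax, hay, ih ht, hxa, hya]

-- A's inner loop over j, for one fixed i in 1..dim, appends exactly B's (up to) two pairs.
theorem inner_loop_eq (dim i : Int) (hi1 : 1 ≤ i) (hi2 : i < dim + 1)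
    (tups : List (Int × Int)) :
    (PySem.List.pyRange 1 (dim + 1) 1).foldl (fun tups j =>
      if i ≠ j then
        if i - j = 1 ∨ j - i = 1 then tups ++ [(i, j)] else tups
      else tups) tups =
    (let tups := if 1 < i then tups ++ [(i, i - 1)] else tups
     if i < dim then tups ++ [(i, i + 1)] else tups) := by
  have hstep : (fun (tups : List (Int × Int)) (j : Int) =>
      if i ≠ j then
        if i - j = 1 ∨ j - i = 1 then tups ++ [(i, j)] else tups
      else tups) =
      (fun tups j => if j == i - 1 || j == i + 1 then tups ++ [(i, j)] else tups) := by
    funext tups j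
    by_cases hc : j = i - 1 ∨ j = i + 1
    · have h1 : i ≠ j := by omega
      have h2 : i - j = 1 ∨ j - i = 1 := by omega
      have hb : (j == i - 1 || j == i + 1) = true := by
        rcases hc with h | h <;> simp [h]
      simp [h1, h2, hb]
    · have hb : (j == i - 1 || j == i + 1) = false := by
        simp only [Bool.or_eq_false_iff, beq_eq_false_iff_ne, ne_eq]
        exact ⟨fun h => hc (Or.inl h), fun h => hc (Or.inr h)⟩
      by_cases h1 : i = j
      · simp [h1]
        omega
      · have h2 : ¬(i - j = 1 ∨ j - i = 1) := by omega
        simp [h1, h2, hb]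
  rw [hstep, PySem.List.foldl_append_if (fun j => j == i - 1 || j == i + 1) (fun j => (i, j))]
  rw [filter_two_mem _ (PySem.List.pairwise_lt_pyRange_one 1 (dim + 1)) (i - 1) (i + 1) (by omega)]
  have hm1 : (i - 1 ∈ PySem.List.pyRange 1 (dim + 1) 1) ↔ 1 < i := by
    rw [PySem.List.mem_pyRange_one]; omega
  have hm2 : (i + 1 ∈ PySem.List.pyRange 1 (dim + 1) 1) ↔ i < dim := by
    rw [PySem.List.mem_pyRange_one]; omega
  by_cases h1 : 1 < i <;> by_cases h2 : i < dim <;>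
    simp [hm1, hm2, h1, h2]

-- ===== VERDICT (by name: the statement is the Claim_ definition above) =====
theorem satisfying_tuples_white_dots_spec : Claim_equal_satisfying_tuples_white_dots := by
  intro dim _
  unfold Spec_satisfying_tuples_white_dots satisfying_tuples_white_dots satisfying_tuples_white_dots_alt
  refine PySem.List.foldl_congr_mem _ _ _ _ ?_
  intro acc i hi
  rw [PySem.List.mem_pyRange_one] at hi
  exact inner_loop_eq dim i hi.1 hi.2 acc
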